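-- pv_equiv track=rewrite | github.com/iFDVCS/spy-cy | test_file.py | mkstr
-- ===== SOURCE A (Python) =====
-- def mkstr(prefix):
--     if len(prefix) == 5:
--         return [prefix]
--     combs = []
--     combs.extend(mkstr(prefix + "A"))
--     combs.extend(mkstr(prefix + "T"))
--     combs.extend(mkstr(prefix + "G"))
--     combs.extend(mkstr(prefix + "C"))
--     return combs
-- ===== SOURCE B (Python) =====
-- import itertools
--
-- def mkstr(prefix):
--     return [prefix + ''.join(t)
--             for t in itertools.product("ATGC", repeat=5 - len(prefix))]
-- ===== Notes on version B (the rewrite author's own statement) =====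
-- stated objective: idiomatic
-- what changed: Replaces the 4-way recursion by a single itertools.product over 'ATGC' with repeat = 5 - len(prefix), joined onto the prefix; Pre_ excludes prefixes longer than 5, on which A hits RecursionError (B raises ValueError there).
import Mathlib
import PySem

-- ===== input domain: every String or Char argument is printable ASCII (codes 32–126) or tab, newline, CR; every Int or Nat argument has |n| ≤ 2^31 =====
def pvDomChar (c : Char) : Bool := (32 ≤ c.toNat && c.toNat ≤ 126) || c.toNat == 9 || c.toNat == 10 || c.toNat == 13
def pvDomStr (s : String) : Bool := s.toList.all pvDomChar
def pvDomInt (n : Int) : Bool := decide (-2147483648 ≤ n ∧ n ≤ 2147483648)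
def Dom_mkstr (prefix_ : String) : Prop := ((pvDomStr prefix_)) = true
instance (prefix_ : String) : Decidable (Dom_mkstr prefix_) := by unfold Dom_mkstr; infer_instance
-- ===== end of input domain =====

-- B replaces A's 4-way recursion by itertools.product over 'ATGC'; same output order, no speed claim.
-- Equivalence is about the return value; on prefixes longer than 5 A raises (RecursionError), excluded by Pre_.

-- ===== PORT A =====
-- A's recursion on prefix+c terminates in Python only when len(prefix) ≤ 5; the fuel
-- 5 - len(prefix) is exactly the recursion depth Python performs on those inputs.
def mkstrF : Nat → List Char → List (List Char)
  | fuel, p =>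
    if p.length = 5 then [p]
    else match fuel with
      | 0 => []  -- unreachable inside Pre_ (Python recurses without bound here)
      | n+1 =>
        mkstrF n (p ++ ['A']) ++ mkstrF n (p ++ ['T']) ++ mkstrF n (p ++ ['G']) ++ mkstrF n (p ++ ['C'])

def mkstr (prefix_ : String) : List String :=
  (mkstrF (5 - prefix_.toList.length) prefix_.toList).map String.mk

-- ===== PORT B =====
-- itertools.product("ATGC", repeat=n): all length-n tuples, last position varying fastest
def prodATGC : Nat → List (List Char)
  | 0 => [[]]
  | n+1 => (['A','T','G','C'] : List Char).flatMap (fun c => (prodATGC n).map (fun t => c :: t))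

def mkstr_alt (prefix_ : String) : List String :=
  (prodATGC (5 - prefix_.toList.length)).map (fun t => String.mk (prefix_.toList ++ t))

-- ===== PRECONDITION & SPEC =====
-- Pre_ excludes prefixes longer than 5 characters: there Python A recurses forever (RecursionError),
-- and B raises ValueError (negative repeat).
def Pre_mkstr (prefix_ : String) : Prop := prefix_.toList.length ≤ 5
instance (prefix_ : String) : Decidable (Pre_mkstr prefix_) := by unfold Pre_mkstr; infer_instance
def pvWitness_mkstr : String := "AT"

def Spec_mkstr (prefix_ : String) (out : List String) : Prop := out = mkstr_alt prefix_
instance (prefix_ : String) (out : List String) : Decidable (Spec_mkstr prefix_ out) := by unfold Spec_mkstr; infer_instance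

-- ===== CLAIM (what is proved, stated in full; the proofs are below) =====
def Claim_equal_mkstr : Prop := ∀ (prefix_ : String), Dom_mkstr prefix_ → Pre_mkstr prefix_ → Spec_mkstr prefix_ (mkstr prefix_)

-- ===== LEMMAS AND PROOFS =====
theorem mkstrF_eq (n : Nat) : ∀ (p : List Char), p.length + n = 5 →
    mkstrF n p = (prodATGC n).map (fun t => p ++ t) := by
  induction n with
  | zero =>
    intro p h
    simp [mkstrF, prodATGC, show p.length = 5 by omega]
  | succ k ih =>
    intro p h
    have hne : p.length ≠ 5 := by omega
    have hc : ∀ c : Char, (p ++ [c]).length + k = 5 := by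
      intro c; simp [List.length_append]; omega
    rw [mkstrF]
    simp only [hne, if_false]
    rw [ih _ (hc 'A'), ih _ (hc 'T'), ih _ (hc 'G'), ih _ (hc 'C')]
    simp [prodATGC, List.flatMap, List.map_map, Function.comp_def, List.append_assoc]

theorem mkstr_spec' (prefix_ : String) (h : Pre_mkstr prefix_) :
    mkstr prefix_ = mkstr_alt prefix_ := by
  unfold mkstr mkstr_alt
  rw [mkstrF_eq (5 - prefix_.toList.length) prefix_.toList (by unfold Pre_mkstr at h; omega)]
  simp [List.map_map, Function.comp_def]

-- ===== VERDICT (by name: the statement is the Claim_ definition above) =====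
theorem mkstr_spec : Claim_equal_mkstr := by
  intro p _ hpre
  exact mkstr_spec' p hpre
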